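-- pv_equiv track=rewrite | github.com/veroniquedemianenko/Duplicates-Hash-Tables | tp2_caillerie_demianenko.py | hash_ferme
-- ===== SOURCE A (Python) =====
-- import string
--
-- alphabet = list(string.ascii_lowercase)
--
-- utf8_alphabet = [ord(letter) for letter in alphabet]
--
-- def emilie_veronique_hachagediv(mot,M):
--     mot = list(mot.lower())
--     nombre = 0
--     for i in range(len(mot)):
--         indice = utf8_alphabet[alphabet.index(mot[i])]
--         nombre += indice*(26**(len(mot)-i-1))
--     h = nombre%M
--     return h
--
-- def hash_ferme(shake, corn, M):
--     table_hachage = [ [] for i in range(M)]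
--     for mot in shake:
--         indice = emilie_veronique_hachagediv(mot,M)
--         table_hachage[indice].append(mot)
--
--     for mot in corn:
--         indice = emilie_veronique_hachagediv(mot,M)
--         table_hachage[indice].append(mot)
--     return table_hachage
-- ===== SOURCE B (Python) =====
-- import string
--
-- _VALUES = {letter: ord(letter) for letter in string.ascii_lowercase}
--
-- def _horner_hash(word, M):
--     h = 0
--     for c in word.lower():
--         h = (h * 26 + _VALUES[c]) % M
--     return h
--
-- def hash_ferme(shake, corn, M):
--     table = [[] for _ in range(M)]
--     for mot in shake + corn:
--         table[_horner_hash(mot, M)].append(mot)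
--     return table
-- ===== Notes on version B (the rewrite author's own statement) =====
-- stated objective: faster
-- what changed: The power-sum hash (recomputing 26**(len-i-1) with a big-int pow each character and scanning alphabet with list.index) is replaced by a Horner accumulator kept reduced mod M at every step with letter values from a precomputed dict, and the two bucketing loops become one pass over shake + corn.
import Mathlib
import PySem

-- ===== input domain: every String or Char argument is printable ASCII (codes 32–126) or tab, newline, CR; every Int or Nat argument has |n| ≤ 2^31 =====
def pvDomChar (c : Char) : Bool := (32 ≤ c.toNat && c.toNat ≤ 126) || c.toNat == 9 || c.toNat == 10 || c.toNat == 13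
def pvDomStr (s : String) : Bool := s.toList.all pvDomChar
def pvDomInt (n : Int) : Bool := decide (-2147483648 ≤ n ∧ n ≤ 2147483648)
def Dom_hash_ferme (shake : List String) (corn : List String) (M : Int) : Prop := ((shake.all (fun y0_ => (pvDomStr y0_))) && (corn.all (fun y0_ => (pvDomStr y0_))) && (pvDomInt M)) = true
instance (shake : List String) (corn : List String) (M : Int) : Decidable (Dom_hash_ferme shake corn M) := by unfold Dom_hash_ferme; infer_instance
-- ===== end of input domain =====

-- B replaces the power-sum hash (26**k recomputed each step, list.index scan) by a Horner
-- accumulator with the modulo folded in and a dict of letter values, bucketing in one pass over shake + corn.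

-- table_hachage[indice].append(mot): in-place append at a list index.  Within Pre_ the index is
-- always in [0, M); on an out-of-range/negative index (excluded by Pre_) it leaves t unchanged.
def pvAppendAt (t : List (List String)) (i : Int) (w : String) : List (List String) :=
  if 0 ≤ i then t.modify i.toNat (fun b => b ++ [w]) else t

-- ===== PORT A =====
def pvAlphabet : List Char :=
  ['a','b','c','d','e','f','g','h','i','j','k','l','m','n','o','p','q','r','s','t','u','v','w','x','y','z']

def pvUtf8Alphabet : List Int := pvAlphabet.map (fun c => (c.toNat : Int))

-- alphabet.index / utf8_alphabet[...] raise on non-letters: excluded by Pre_, the defaults are unreachable there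
def emilie_veronique_hachagediv (mot : String) (M : Int) : Int :=
  let l := (PySem.Str.lower mot).toList
  let nombre := (List.range l.length).foldl
    (fun nombre i =>
      let indice := (PySem.List.pyGet? pvUtf8Alphabet
        (((PySem.List.index? pvAlphabet (l.getD i ' ')).getD 0 : Nat) : Int)).getD 0
      nombre + indice * (26 : Int) ^ (l.length - i - 1)) 0
  PySem.Int.mod nombre M

def hash_ferme (shake : List String) (corn : List String) (M : Int) : List (List String) :=
  let table := (PySem.List.pyRange 0 M 1).map (fun _ => ([] : List String))
  let table := shake.foldl (fun t mot => pvAppendAt t (emilie_veronique_hachagediv mot M) mot) table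
  corn.foldl (fun t mot => pvAppendAt t (emilie_veronique_hachagediv mot M) mot) table

-- ===== PORT B =====
def pvValues : PySem.Dict Char Int :=
  PySem.Dict.ofList (pvAlphabet.map (fun c => (c, (c.toNat : Int))))

-- _VALUES[c] raises KeyError on non-letters: excluded by Pre_, the default 0 is unreachable there
def pvHornerHash (word : String) (M : Int) : Int :=
  (PySem.Str.lower word).toList.foldl
    (fun h c => PySem.Int.mod (h * 26 + pvValues.getD c 0) M) 0

def hash_ferme_alt (shake : List String) (corn : List String) (M : Int) : List (List String) :=
  (shake ++ corn).foldl (fun t mot => pvAppendAt t (pvHornerHash mot M) mot)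
    ((PySem.List.pyRange 0 M 1).map (fun _ => ([] : List String)))

-- ===== PRECONDITION & SPEC =====
-- the lowercase letters (used only by Pre_; kept separate from the ports' own tables)
def pvLettersAZ : List Char :=
  ['a','b','c','d','e','f','g','h','i','j','k','l','m','n','o','p','q','r','s','t','u','v','w','x','y','z']

-- Pre_ excludes exactly the inputs where A raises: a word containing (after .lower()) a character
-- that is not a lowercase ASCII letter (ValueError from alphabet.index), and M ≤ 0 with a
-- nonempty word list (ZeroDivisionError for M = 0, IndexError for M < 0); with both lists empty
-- any M is admitted (A returns []).
def Pre_hash_ferme (shake : List String) (corn : List String) (M : Int) : Prop :=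
  ((shake ++ corn).all (fun w => (PySem.Str.lower w).toList.all (fun c => pvLettersAZ.contains c))) = true ∧
  (1 ≤ M ∨ (shake = [] ∧ corn = []))

instance (shake : List String) (corn : List String) (M : Int) : Decidable (Pre_hash_ferme shake corn M) := by unfold Pre_hash_ferme; infer_instance

def pvWitness_hash_ferme : List String × List String × Int := (["abc", "Zz"], ["q"], 5)

def Spec_hash_ferme (shake : List String) (corn : List String) (M : Int) (out : List (List String)) : Prop := out = hash_ferme_alt shake corn M
instance (shake : List String) (corn : List String) (M : Int) (out : List (List String)) : Decidable (Spec_hash_ferme shake corn M out) := by unfold Spec_hash_ferme; infer_instance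

-- ===== CLAIM (what is proved, stated in full; the proofs are below) =====
def Claim_equal_hash_ferme : Prop := ∀ (shake : List String) (corn : List String) (M : Int), Dom_hash_ferme shake corn M → Pre_hash_ferme shake corn M → Spec_hash_ferme shake corn M (hash_ferme shake corn M)

-- ===== LEMMAS AND PROOFS =====

-- on the 26 letters, A's table value and B's dict value both equal the code point
set_option maxRecDepth 4000 in
theorem pv_char_val : ∀ c ∈ pvLettersAZ,
    (PySem.List.pyGet? pvUtf8Alphabet
        (((PySem.List.index? pvAlphabet c).getD 0 : Nat) : Int)).getD 0 = (c.toNat : Int)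
    ∧ pvValues.getD c 0 = (c.toNat : Int) := by
  intro c hc
  fin_cases hc <;> exact ⟨by decide, by decide⟩

-- additive range-fold = init + sum of mapped range
theorem pv_foldl_add_sum (g : Nat → Int) (rng : List Nat) (a : Int) :
    rng.foldl (fun acc i => acc + g i) a = a + (rng.map g).sum := by
  induction rng generalizing a with
  | nil => simp
  | cons i t ih => rw [List.foldl_cons, ih (a + g i)]; simp [add_assoc]

-- Horner fold (no modulo) equals A's power sum
theorem pv_horner_eq_sum (v : Char → Int) (l : List Char) :
    l.foldl (fun h c => h * 26 + v c) 0 =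
      ((List.range l.length).map (fun i => v (l.getD i ' ') * (26 : Int) ^ (l.length - i - 1))).sum := by
  induction l using List.reverseRecOn with
  | nil => simp
  | append_singleton t c ih =>
    rw [List.foldl_append, List.foldl_cons, List.foldl_nil, ih]
    have hlen : (t ++ [c]).length = t.length + 1 := by simp
    rw [hlen, List.range_succ, List.map_append, List.sum_append]
    have hlast : (t ++ [c]).getD t.length ' ' = c := by
      simp [List.getD]
    have hterm : ((List.range t.length).map
        (fun i => v ((t ++ [c]).getD i ' ') * (26 : Int) ^ (t.length + 1 - i - 1))).sum =
        ((List.range t.length).map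
        (fun i => (v (t.getD i ' ') * (26 : Int) ^ (t.length - i - 1)) * 26)).sum := by
      apply congrArg
      apply List.map_congr_left
      intro i hi
      rw [List.mem_range] at hi
      have h1 : (t ++ [c]).getD i ' ' = t.getD i ' ' := by
        simp [List.getD, List.getElem?_append_left hi]
      have h2 : t.length + 1 - i - 1 = (t.length - i - 1) + 1 := by omega
      rw [h1, h2, pow_succ]; ring
    rw [hterm]
    have h0 : t.length + 1 - t.length - 1 = 0 := by omega
    simp only [List.map_cons, List.map_nil, List.sum_cons, List.sum_nil, hlast, h0, pow_zero,
      mul_one, add_zero, List.sum_map_mul_right]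

-- folding the modulo into the Horner accumulator (M ≥ 1)
theorem pv_horner_mod (v : Char → Int) (M : Int) (hM : 1 ≤ M) (l : List Char) (h : Int) :
    l.foldl (fun h c => PySem.Int.mod (h * 26 + v c) M) (PySem.Int.mod h M) =
      PySem.Int.mod (l.foldl (fun h c => h * 26 + v c) h) M := by
  induction l generalizing h with
  | nil => simp
  | cons c t ih =>
    rw [List.foldl_cons, List.foldl_cons]
    have hpos : (0 : Int) < M := by omega
    have key : PySem.Int.mod (PySem.Int.mod h M * 26 + v c) M
        = PySem.Int.mod (h * 26 + v c) M := by
      rw [PySem.Int.mod_eq_emod_of_pos hpos, PySem.Int.mod_eq_emod_of_pos hpos,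
          PySem.Int.mod_eq_emod_of_pos hpos]
      exact Int.ModEq.add_right (v c) (Int.ModEq.mul_right 26 (Int.emod_emod_of_dvd h dvd_rfl))
    rw [key]
    exact ih (h * 26 + v c)

-- per word: the two hash functions agree (M ≥ 1, letters only)
theorem pv_hash_eq (w : String) (M : Int) (hM : 1 ≤ M)
    (hw : ∀ c ∈ (PySem.Str.lower w).toList, c ∈ pvLettersAZ) :
    emilie_veronique_hachagediv w M = pvHornerHash w M := by
  have hpos : (0 : Int) < M := by omega
  simp only [emilie_veronique_hachagediv, pvHornerHash]
  -- A's range fold is the power sum, which is the mod-free Horner fold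
  rw [pv_foldl_add_sum, zero_add, ← pv_horner_eq_sum
    (fun c => (PySem.List.pyGet? pvUtf8Alphabet
      (((PySem.List.index? pvAlphabet c).getD 0 : Nat) : Int)).getD 0) ((PySem.Str.lower w).toList)]
  -- replace A's per-char values by B's on the letters of l
  have hAB : List.foldl (fun h c => h * 26 + (PySem.List.pyGet? pvUtf8Alphabet
        (((PySem.List.index? pvAlphabet c).getD 0 : Nat) : Int)).getD 0) 0 ((PySem.Str.lower w).toList)
      = List.foldl (fun h c => h * 26 + pvValues.getD c 0) 0 ((PySem.Str.lower w).toList) :=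
    PySem.List.foldl_congr_mem _ _ _ _ (by
      intro acc c hc
      rcases pv_char_val c (hw c hc) with ⟨hA, hB⟩
      rw [hA, hB])
  rw [hAB]
  -- fold the modulo into the accumulator
  have h0 : (0 : Int) = PySem.Int.mod 0 M := by
    rw [PySem.Int.mod_eq_emod_of_pos hpos]; simp
  have hm := pv_horner_mod (fun c => pvValues.getD c 0) M hM ((PySem.Str.lower w).toList) 0
  rw [← h0] at hm
  exact hm.symm

theorem hash_ferme_spec : Claim_equal_hash_ferme := by
  intro shake corn M _ hPre
  rcases hPre with ⟨hletters0, hM⟩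
  have hletters : ∀ w ∈ shake ++ corn, ∀ c ∈ (PySem.Str.lower w).toList, c ∈ pvLettersAZ := by
    intro w hw c hc
    have h1 := hletters0
    rw [List.all_eq_true] at h1
    have h2 := h1 w hw
    rw [List.all_eq_true] at h2
    have h3 := h2 c hc
    simpa using h3
  simp only [Spec_hash_ferme, hash_ferme, hash_ferme_alt]
  rcases hM with hM | ⟨hs, hc⟩
  · rw [List.foldl_append]
    have hA : ∀ (l : List String), (∀ w ∈ l, w ∈ shake ++ corn) →
        ∀ (t : List (List String)),
        l.foldl (fun t mot => pvAppendAt t (emilie_veronique_hachagediv mot M) mot) t =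
        l.foldl (fun t mot => pvAppendAt t (pvHornerHash mot M) mot) t := by
      intro l hsub t
      apply PySem.List.foldl_congr_mem
      intro acc w hwmem
      rw [pv_hash_eq w M hM (hletters w (hsub w hwmem))]
    rw [hA shake (fun w hw => List.mem_append_left _ hw),
        hA corn (fun w hw => List.mem_append_right _ hw)]
  · subst hs; subst hc; rfl
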